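-- pv_equiv track=rewrite | github.com/nithinveer/leetcode-solutions | Path With Maximum Minimum Value.py | maximumMinimumPath
-- ===== SOURCE A (Python) =====
-- import heapq
--
-- def maximumMinimumPath(A):
--     """
--     :type A: List[List[int]]
--     :rtype: int
--     """
--     dirs = [[1,0],[0,1],[0,-1],[-1,0]]
--     rows = len(A)
--     cols = len(A[0])
--     tmp = [(-A[0][0],0,0)]
--     heapq.heapify(tmp)
--     rtn = float('inf')
--     visited = set()
--     visited.add((0,0))
--     while tmp :
--         val, x, y  = heapq.heappop(tmp)
--         rtn = min(rtn, -val)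
--         if x == rows-1 and y == cols-1:
--             return rtn
--         for dir in dirs:
--             X, Y = x+dir[0], y+dir[1]
--             if 0<=X< rows and 0<=Y<cols and (X,Y) not in visited:
--                 heapq.heappush(tmp, (-A[X][Y], X, Y))
--                 visited.add((X,Y))
-- ===== SOURCE B (Python) =====
-- def maximumMinimumPath(A):
--     """
--     :type A: List[List[int]]
--     :rtype: int
--     """
--     rows, cols = len(A), len(A[0])
--     frontier = [(-A[0][0], 0, 0)]
--     visited = {(0, 0)}
--     rtn = A[0][0]
--     while frontier:
--         best = min(frontier)
--         frontier.remove(best)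
--         val, x, y = best
--         rtn = min(rtn, -val)
--         if x == rows - 1 and y == cols - 1:
--             return rtn
--         for dx, dy in ((1, 0), (0, 1), (0, -1), (-1, 0)):
--             X, Y = x + dx, y + dy
--             if 0 <= X < rows and 0 <= Y < cols and (X, Y) not in visited:
--                 frontier.append((-A[X][Y], X, Y))
--                 visited.add((X, Y))
-- ===== Notes on version B (the rewrite author's own statement) =====
-- stated objective: simpler
-- what changed: Replaces the heapq binary-heap priority queue with a plain unsorted frontier list from which each round's best cell is extracted by a linear min scan (Prim-style extract-min), and initializes the running answer to A[0][0] instead of float('inf').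
-- outside the precondition, e.g. on maximumMinimumPath([[9, 0, 0], [9, 0], [9, 9, 9]]): A returns 9, B returns 9
import Mathlib
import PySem

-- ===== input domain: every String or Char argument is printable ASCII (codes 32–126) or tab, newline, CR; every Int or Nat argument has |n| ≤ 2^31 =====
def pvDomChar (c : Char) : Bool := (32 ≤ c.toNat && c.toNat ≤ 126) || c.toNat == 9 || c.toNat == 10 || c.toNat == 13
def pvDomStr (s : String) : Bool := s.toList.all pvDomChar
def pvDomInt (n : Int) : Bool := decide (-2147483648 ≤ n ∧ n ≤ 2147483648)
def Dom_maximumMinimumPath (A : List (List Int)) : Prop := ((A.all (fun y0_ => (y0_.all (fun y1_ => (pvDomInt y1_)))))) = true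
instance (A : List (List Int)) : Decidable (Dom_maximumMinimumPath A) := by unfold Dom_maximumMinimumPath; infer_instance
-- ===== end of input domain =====

-- B replaces A's heapq priority queue by a plain frontier list scanned linearly for its
-- minimum each round (Prim-style extract-min); same return value, no speed claim.

-- ===== PORT A =====
-- Python tuple comparison on the int triples (-value, x, y) (exact).
def pvTlt (a b : Int × Int × Int) : Bool :=
  a.1 < b.1 || (a.1 == b.1 && (a.2.1 < b.2.1 || (a.2.1 == b.2.1 && a.2.2 < b.2.2)))

def pvZ : Int × Int × Int := (0, 0, 0)

-- CPython heapq._siftdown(heap, 0, pos), with newitem = the value conceptually sitting at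
-- pos, passed explicitly; indices are nonnegative and in range, so Nat indexing with getD
-- is exact for the calls A performs.
def pvSiftdown (heap : List (Int × Int × Int)) (pos : Nat) (newitem : Int × Int × Int) :
    List (Int × Int × Int) :=
  if 0 < pos then
    if pvTlt newitem (heap.getD ((pos - 1) / 2) pvZ) then
      pvSiftdown (heap.set pos (heap.getD ((pos - 1) / 2) pvZ)) ((pos - 1) / 2) newitem
    else heap.set pos newitem
  else heap.set pos newitem
termination_by pos
decreasing_by omega

-- CPython heapq._siftup(heap, pos) (startpos = 0), newitem passed explicitly.
-- the smaller child of pos (CPython picks the right child on ties)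
def pvChild (heap : List (Int × Int × Int)) (pos : Nat) : Nat :=
  if 2 * pos + 2 < heap.length &&
      !(pvTlt (heap.getD (2 * pos + 1) pvZ) (heap.getD (2 * pos + 2) pvZ)) then
    2 * pos + 2
  else 2 * pos + 1

def pvSiftup (heap : List (Int × Int × Int)) (pos : Nat) (newitem : Int × Int × Int) :
    List (Int × Int × Int) :=
  if _h : 2 * pos + 1 < heap.length then
    pvSiftup (heap.set pos (heap.getD (pvChild heap pos) pvZ)) (pvChild heap pos) newitem
  else pvSiftdown (heap.set pos newitem) pos newitem
termination_by heap.length - pos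
decreasing_by simp only [List.length_set]; simp only [pvChild]; split <;> omega

-- heapq.heappush: append then sift down from the new last slot.
def pvHeappush (heap : List (Int × Int × Int)) (item : Int × Int × Int) :
    List (Int × Int × Int) :=
  pvSiftdown (heap ++ [item]) heap.length item

-- heapq.heappop: pop the last element; if the heap is still nonempty, move it to the root
-- and sift up.  Returns (popped item, remaining heap); A only pops nonempty heaps.
def pvHeappop (heap : List (Int × Int × Int)) :
    (Int × Int × Int) × List (Int × Int × Int) :=
  let lastelt := heap.getLast?.getD pvZ
  let rest := heap.dropLast
  if rest.isEmpty then (lastelt, [])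
  else (rest.headD pvZ, pvSiftup (rest.set 0 lastelt) 0 lastelt)

-- min(rtn, -val) where rtn starts as float('inf') (modelled by none).
def pvMinInf (rtn : Option Int) (v : Int) : Int :=
  match rtn with
  | none => v
  | some r => min r v

-- body of A's 'for dir in dirs' loop
def pvPushA (A : List (List Int)) (rows cols x y : Int)
    (st : List (Int × Int × Int) × PySem.Set (Int × Int)) (d : Int × Int) :
    List (Int × Int × Int) × PySem.Set (Int × Int) :=
  let X := x + d.1
  let Y := y + d.2
  if 0 ≤ X ∧ X < rows ∧ 0 ≤ Y ∧ Y < cols ∧ ¬(PySem.Set.contains st.2 (X, Y) = true) then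
    (pvHeappush st.1 (-(PySem.List.pyGetD (PySem.List.pyGetD A X []) Y 0), X, Y),
      PySem.Set.add st.2 (X, Y))
  else st

-- A's while loop; fuel = rows*cols + 1 bounds the number of pops (each pushed cell is
-- marked visited, so at most rows*cols items ever enter the heap); the fuel-0 and
-- empty-heap fallbacks are unreachable on inputs satisfying Pre_.
def pvLoopA (A : List (List Int)) (rows cols : Int) :
    Nat → List (Int × Int × Int) → PySem.Set (Int × Int) → Option Int → Int
  | 0, _, _, rtn => rtn.getD 0
  | fuel + 1, heap, visited, rtn =>
    match heap with
    | [] => rtn.getD 0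
    | _ :: _ =>
      let p := pvHeappop heap
      let val := p.1.1
      let x := p.1.2.1
      let y := p.1.2.2
      let rtn' := pvMinInf rtn (-val)
      if x = rows - 1 ∧ y = cols - 1 then rtn'
      else
        let st := [((1 : Int), (0 : Int)), (0, 1), (0, -1), (-1, 0)].foldl
          (pvPushA A rows cols x y) (p.2, visited)
        pvLoopA A rows cols fuel st.1 st.2 (some rtn')

def maximumMinimumPath (A : List (List Int)) : Int :=
  let rows : Int := A.length
  let cols : Int := (PySem.List.pyGetD A 0 []).length
  let a00 : Int := PySem.List.pyGetD (PySem.List.pyGetD A 0 []) 0 0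
  pvLoopA A rows cols (rows.toNat * cols.toNat + 1) [(-a00, 0, 0)]
    (PySem.Set.add PySem.Set.empty ((0 : Int), (0 : Int))) none

-- ===== PORT B =====
-- min(frontier): Python min keeps the FIRST minimal element.
def pvMinFirst : List (Int × Int × Int) → Int × Int × Int
  | [] => pvZ
  | x :: xs => xs.foldl (fun m y => if pvTlt y m then y else m) x

-- body of B's 'for dx, dy in …' loop: plain append to the frontier list
def pvPushB (A : List (List Int)) (rows cols x y : Int)
    (st : List (Int × Int × Int) × PySem.Set (Int × Int)) (d : Int × Int) :
    List (Int × Int × Int) × PySem.Set (Int × Int) :=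
  let X := x + d.1
  let Y := y + d.2
  if 0 ≤ X ∧ X < rows ∧ 0 ≤ Y ∧ Y < cols ∧ ¬(PySem.Set.contains st.2 (X, Y) = true) then
    (st.1 ++ [(-(PySem.List.pyGetD (PySem.List.pyGetD A X []) Y 0), X, Y)],
      PySem.Set.add st.2 (X, Y))
  else st

-- B's while loop (same fuel bound on the number of rounds as A's port).
def pvLoopB (A : List (List Int)) (rows cols : Int) :
    Nat → List (Int × Int × Int) → PySem.Set (Int × Int) → Int → Int
  | 0, _, _, rtn => rtn
  | fuel + 1, frontier, visited, rtn =>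
    match frontier with
    | [] => rtn
    | _ :: _ =>
      let best := pvMinFirst frontier
      let frontier' := (PySem.List.remove? frontier best).getD []
      let rtn' := min rtn (-best.1)
      if best.2.1 = rows - 1 ∧ best.2.2 = cols - 1 then rtn'
      else
        let st := [((1 : Int), (0 : Int)), (0, 1), (0, -1), (-1, 0)].foldl
          (pvPushB A rows cols best.2.1 best.2.2) (frontier', visited)
        pvLoopB A rows cols fuel st.1 st.2 rtn'

def maximumMinimumPath_alt (A : List (List Int)) : Int :=
  let rows : Int := A.length
  let cols : Int := (PySem.List.pyGetD A 0 []).length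
  let a00 : Int := PySem.List.pyGetD (PySem.List.pyGetD A 0 []) 0 0
  pvLoopB A rows cols (rows.toNat * cols.toNat + 1) [(-a00, 0, 0)]
    (PySem.Set.ofList [((0 : Int), (0 : Int))]) a00

-- ===== PRECONDITION & SPEC =====
-- Pre_ requires a nonempty grid whose first row is nonempty and no row shorter than the
-- first row (Python's cols = len(A[0])): this excludes exactly the inputs where A raises
-- IndexError (empty grid, empty first row, ragged short rows that get indexed) — on a few
-- ragged grids whose short rows happen never to be indexed A still returns; those are
-- excluded too (see the cite in the claim).
def Pre_maximumMinimumPath (A : List (List Int)) : Prop :=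
  A ≠ [] ∧ 0 < (A.headD []).length ∧ ∀ r ∈ A, (A.headD []).length ≤ r.length

instance (A : List (List Int)) : Decidable (Pre_maximumMinimumPath A) := by
  unfold Pre_maximumMinimumPath; infer_instance

def pvWitness_maximumMinimumPath : List (List Int) := [[5, 4], [1, 1]]

def Spec_maximumMinimumPath (A : List (List Int)) (out : Int) : Prop :=
  out = maximumMinimumPath_alt A
instance (A : List (List Int)) (out : Int) : Decidable (Spec_maximumMinimumPath A out) := by
  unfold Spec_maximumMinimumPath; infer_instance

-- ===== CLAIM (what is proved, stated in full; the proofs are below) =====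
def Claim_equal_maximumMinimumPath : Prop :=
  ∀ (A : List (List Int)), Dom_maximumMinimumPath A → Pre_maximumMinimumPath A →
    Spec_maximumMinimumPath A (maximumMinimumPath A)

-- ===== LEMMAS AND PROOFS =====

-- the strict lexicographic order pvTlt decides, as a Prop
def pvLt (a b : Int × Int × Int) : Prop :=
  a.1 < b.1 ∨ (a.1 = b.1 ∧ (a.2.1 < b.2.1 ∨ (a.2.1 = b.2.1 ∧ a.2.2 < b.2.2)))

theorem pvTlt_iff (a b : Int × Int × Int) : pvTlt a b = true ↔ pvLt a b := by
  obtain ⟨a1, a2, a3⟩ := a; obtain ⟨b1, b2, b3⟩ := b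
  simp [pvTlt, pvLt]

theorem pvTlt_false_iff (a b : Int × Int × Int) : pvTlt a b = false ↔ ¬ pvLt a b := by
  rw [← pvTlt_iff]; cases pvTlt a b <;> simp

theorem pvLt_irrefl (a : Int × Int × Int) : ¬ pvLt a a := by
  obtain ⟨a1, a2, a3⟩ := a; simp [pvLt]

theorem pvLt_asymm {a b : Int × Int × Int} (h : pvLt a b) : ¬ pvLt b a := by
  obtain ⟨a1, a2, a3⟩ := a; obtain ⟨b1, b2, b3⟩ := b
  simp only [pvLt] at *; omega

theorem pvLt_trans {a b c : Int × Int × Int} (h1 : pvLt a b) (h2 : pvLt b c) : pvLt a c := by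
  obtain ⟨a1, a2, a3⟩ := a; obtain ⟨b1, b2, b3⟩ := b; obtain ⟨c1, c2, c3⟩ := c
  simp only [pvLt] at *; omega

theorem pvLe_trans {a b c : Int × Int × Int} (h1 : ¬ pvLt b a) (h2 : ¬ pvLt c b) :
    ¬ pvLt c a := fun h => by
  obtain ⟨a1, a2, a3⟩ := a; obtain ⟨b1, b2, b3⟩ := b; obtain ⟨c1, c2, c3⟩ := c
  simp only [pvLt] at *; omega

theorem pvLe_antisymm {a b : Int × Int × Int} (h1 : ¬ pvLt a b) (h2 : ¬ pvLt b a) : a = b := by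
  obtain ⟨a1, a2, a3⟩ := a; obtain ⟨b1, b2, b3⟩ := b
  simp only [pvLt, Prod.mk.injEq] at *
  refine ⟨by omega, by omega, by omega⟩

theorem pvLe_of_lt_of_le {x p i : Int × Int × Int} (h1 : pvLt x p) (h2 : ¬ pvLt i p) :
    ¬ pvLt i x := fun h => h2 (pvLt_trans h h1)

-- getD / set bookkeeping
theorem pvGetD_eq_getElem (l : List (Int × Int × Int)) (i : Nat) (h : i < l.length) :
    l.getD i pvZ = l[i] := by
  simp [List.getD_eq_getElem?_getD, List.getElem?_eq_getElem h]

theorem pvGetD_set (l : List (Int × Int × Int)) (i j : Nat) (v : Int × Int × Int) :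
    (l.set i v).getD j pvZ = if i = j ∧ i < l.length then v else l.getD j pvZ := by
  by_cases hij : i = j
  · subst hij
    by_cases hi : i < l.length
    · rw [pvGetD_eq_getElem _ i (by simpa using hi)]
      simp [hi]
    · rw [List.set_eq_of_length_le (by omega : l.length ≤ i)]
      simp [hi]
  · simp [List.getD_eq_getElem?_getD, List.getElem?_set_ne hij, hij]

theorem pvCount_set (l : List (Int × Int × Int)) (i : Nat) (a b : Int × Int × Int)
    (h : i < l.length) :
    (l.set i a).count b + (if l[i] = b then 1 else 0) = l.count b + (if a = b then 1 else 0) := by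
  have hc := List.count_set (a := a) (b := b) (l := l) (i := i) h
  have hle : (if l[i] = b then 1 else 0) ≤ l.count b := by
    split_ifs with hb
    · subst hb; exact List.one_le_count_iff.2 (l.getElem_mem h)
    · omega
  simp only [beq_iff_eq] at hc
  omega

theorem pvPerm_set_set (l : List (Int × Int × Int)) (i j : Nat) (x : Int × Int × Int)
    (hi : i < l.length) (hj : j < l.length) (hij : i ≠ j) :
    ((l.set i (l.getD j pvZ)).set j x).Perm (l.set i x) := by
  rw [pvGetD_eq_getElem l j hj]
  rw [List.perm_iff_count]
  intro b
  have hj' : j < (l.set i l[j]).length := by simpa using hj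
  have e1 := pvCount_set (l.set i l[j]) j x b hj'
  have e2 := pvCount_set l i l[j] b hi
  have e3 := pvCount_set l i x b hi
  simp only [List.getElem_set_ne hij] at e1
  omega

-- the binary-heap invariant (parent ≤ child, via the decided order)
def pvIsHeap (h : List (Int × Int × Int)) : Prop :=
  ∀ i, 0 < i → i < h.length → ¬ pvLt (h.getD i pvZ) (h.getD ((i - 1) / 2) pvZ)

theorem pvRoot_min (h : List (Int × Int × Int)) (hh : pvIsHeap h) :
    ∀ i, i < h.length → ¬ pvLt (h.getD i pvZ) (h.getD 0 pvZ) := by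
  intro i
  induction i using Nat.strong_induction_on with
  | _ i ih =>
    intro hi
    rcases Nat.eq_zero_or_pos i with h0 | h0
    · subst h0; exact pvLt_irrefl _
    · exact pvLe_trans (ih ((i - 1) / 2) (by omega) (by omega)) (hh i h0 hi)

theorem pvRoot_min_mem (a : Int × Int × Int) (t : List (Int × Int × Int))
    (hh : pvIsHeap (a :: t)) : ∀ y ∈ a :: t, ¬ pvLt y a := by
  intro y hy
  obtain ⟨i, hi, rfl⟩ := List.mem_iff_getElem.1 hy
  have h0 : (a :: t).getD 0 pvZ = a := rfl
  have := pvRoot_min (a :: t) hh i hi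
  rwa [pvGetD_eq_getElem _ i hi, h0] at this

-- precondition of CPython's _siftdown(heap, 0, pos) with conceptual value x at pos:
-- (1) every parent/child edge not touching pos holds; (2) children of pos dominate x;
-- (3) children of pos dominate pos's parent.
def pvSdPre (h : List (Int × Int × Int)) (pos : Nat) (x : Int × Int × Int) : Prop :=
  (∀ i, 0 < i → i < h.length → i ≠ pos → (i - 1) / 2 ≠ pos →
      ¬ pvLt (h.getD i pvZ) (h.getD ((i - 1) / 2) pvZ)) ∧
  (∀ i, i < h.length → (i - 1) / 2 = pos → i ≠ pos → ¬ pvLt (h.getD i pvZ) x) ∧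
  (∀ i, i < h.length → (i - 1) / 2 = pos → i ≠ pos → 0 < pos →
      ¬ pvLt (h.getD i pvZ) (h.getD ((pos - 1) / 2) pvZ))

theorem pvSiftdown_spec :
    ∀ (pos : Nat) (h : List (Int × Int × Int)) (x : Int × Int × Int),
      pos < h.length → pvSdPre h pos x →
      pvIsHeap (pvSiftdown h pos x) ∧ (pvSiftdown h pos x).Perm (h.set pos x) := by
  intro pos
  induction pos using Nat.strong_induction_on with
  | _ pos ih =>
    intro h x hpos hpre
    obtain ⟨pre1, pre2, pre3⟩ := hpre
    rw [pvSiftdown]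
    by_cases hp : 0 < pos
    · simp only [if_pos hp]
      by_cases ht : pvTlt x (h.getD ((pos - 1) / 2) pvZ) = true
      · -- move the parent down and recurse at parentpos
        rw [if_pos ht]
        have hlt : pvLt x (h.getD ((pos - 1) / 2) pvZ) := (pvTlt_iff _ _).1 ht
        have hpp : (pos - 1) / 2 < pos := by omega
        have hplen : (pos - 1) / 2 < h.length := by omega
        set pp := (pos - 1) / 2 with hppdef
        have hlen' : pp < (h.set pos (h.getD pp pvZ)).length := by simpa using hplen
        have hrec := ih pp hpp (h.set pos (h.getD pp pvZ)) x hlen' ?_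
        · refine ⟨hrec.1, hrec.2.trans ?_⟩
          exact pvPerm_set_set h pos pp x hpos hplen (by omega)
        · -- pvSdPre for the shifted state
          constructor
          · intro i h0i hilen hine hipar
            rw [List.length_set] at hilen
            rw [pvGetD_set, pvGetD_set]
            have hipos : i ≠ pos := by
              intro hh'; subst hh'; exact hipar hppdef.symm
            by_cases hcp : (i - 1) / 2 = pos
            · -- i is a child of pos: its new parent value is the old parent of pos
              have : ¬ (pos = i ∧ pos < h.length) := by
                intro hc; exact hipos hc.1.symm
              rw [if_neg this, if_pos ⟨hcp.symm, hpos⟩]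
              exact pre3 i hilen hcp hipos hp
            · have : ¬ (pos = i ∧ pos < h.length) := fun hc => hipos hc.1.symm
              have h2 : ¬ (pos = (i - 1) / 2 ∧ pos < h.length) := fun hc => hcp hc.1.symm
              rw [if_neg this, if_neg h2]
              exact pre1 i h0i hilen hipos hcp
          constructor
          · intro i hilen hipar hine
            rw [List.length_set] at hilen
            rw [pvGetD_set]
            by_cases hipos : i = pos
            · subst hipos
              rw [if_pos ⟨rfl, hpos⟩]
              exact pvLt_asymm hlt
            · have : ¬ (pos = i ∧ pos < h.length) := fun hc => hipos hc.1.symm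
              rw [if_neg this]
              have h0i : 0 < i := by omega
              have hipar' : (i - 1) / 2 ≠ pos := by omega
              have := pre1 i h0i hilen hipos hipar'
              rw [hipar] at this
              exact pvLe_of_lt_of_le hlt this
          · intro i hilen hipar hine hpp0
            rw [List.length_set] at hilen
            have hgp : (pp - 1) / 2 ≠ pos := by omega
            rw [pvGetD_set, pvGetD_set]
            have h2 : ¬ (pos = (pp - 1) / 2 ∧ pos < h.length) := fun hc => hgp hc.1.symm
            rw [if_neg h2]
            by_cases hipos : i = pos
            · subst hipos
              rw [if_pos ⟨rfl, hpos⟩]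
              exact pre1 pp hpp0 hplen (by omega) (by omega)
            · have : ¬ (pos = i ∧ pos < h.length) := fun hc => hipos hc.1.symm
              rw [if_neg this]
              have h0i : 0 < i := by omega
              have h3 := pre1 i h0i hilen hipos (by omega)
              rw [hipar] at h3
              exact pvLe_trans (pre1 pp hpp0 hplen (by omega) (by omega)) h3
      · -- stop: place x at pos
        rw [if_neg ht]
        refine ⟨?_, List.Perm.refl _⟩
        intro i h0i hilen
        rw [List.length_set] at hilen
        rw [pvGetD_set, pvGetD_set]
        by_cases hipos : i = pos
        · subst hipos
          have hgp : (i - 1) / 2 ≠ i := by omega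
          have h2 : ¬ (i = (i - 1) / 2 ∧ i < h.length) := fun hc => hgp hc.1.symm
          rw [if_pos ⟨rfl, hpos⟩, if_neg h2]
          exact (pvTlt_false_iff _ _).1 (by simpa using ht)
        · have h1 : ¬ (pos = i ∧ pos < h.length) := fun hc => hipos hc.1.symm
          rw [if_neg h1]
          by_cases hcp : (i - 1) / 2 = pos
          · rw [if_pos ⟨hcp.symm, hpos⟩]
            exact pre2 i hilen hcp hipos
          · have h2 : ¬ (pos = (i - 1) / 2 ∧ pos < h.length) := fun hc => hcp hc.1.symm
            rw [if_neg h2]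
            exact pre1 i h0i hilen hipos hcp
    · -- pos = 0
      have hp0 : pos = 0 := by omega
      subst hp0
      simp only [if_neg hp]
      refine ⟨?_, List.Perm.refl _⟩
      intro i h0i hilen
      rw [List.length_set] at hilen
      rw [pvGetD_set, pvGetD_set]
      have h1 : ¬ ((0 : Nat) = i ∧ 0 < h.length) := fun hc => by omega
      rw [if_neg h1]
      by_cases hcp : (i - 1) / 2 = 0
      · rw [if_pos ⟨hcp.symm, hpos⟩]
        exact pre2 i hilen hcp (by omega)
      · have h2 : ¬ ((0 : Nat) = (i - 1) / 2 ∧ 0 < h.length) := fun hc => hcp hc.1.symm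
        rw [if_neg h2]
        exact pre1 i h0i hilen (by omega) hcp

-- precondition of CPython's _siftup(heap, pos): every edge not touching the hole at pos
-- holds, and the children of the hole dominate the hole's parent.
def pvSuPre (h : List (Int × Int × Int)) (pos : Nat) : Prop :=
  (∀ i, 0 < i → i < h.length → i ≠ pos → (i - 1) / 2 ≠ pos →
      ¬ pvLt (h.getD i pvZ) (h.getD ((i - 1) / 2) pvZ)) ∧
  (∀ i, i < h.length → (i - 1) / 2 = pos → i ≠ pos → 0 < pos →
      ¬ pvLt (h.getD i pvZ) (h.getD ((pos - 1) / 2) pvZ))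

theorem pvChild_bounds (h : List (Int × Int × Int)) (pos : Nat) :
    2 * pos + 1 ≤ pvChild h pos ∧ pvChild h pos ≤ 2 * pos + 2 := by
  unfold pvChild; split <;> omega

theorem pvChild_lt (h : List (Int × Int × Int)) (pos : Nat)
    (hc : 2 * pos + 1 < h.length) : pvChild h pos < h.length := by
  unfold pvChild
  split
  · rename_i hx
    simp only [Bool.and_eq_true, decide_eq_true_eq] at hx
    exact hx.1
  · exact hc

theorem pvChild_min (h : List (Int × Int × Int)) (pos s : Nat)
    (hs : s < h.length) (h1 : 2 * pos + 1 ≤ s) (h2 : s ≤ 2 * pos + 2)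
    (hne : s ≠ pvChild h pos) :
    ¬ pvLt (h.getD s pvZ) (h.getD (pvChild h pos) pvZ) := by
  by_cases hcond : (decide (2 * pos + 2 < h.length) &&
      !pvTlt (h.getD (2 * pos + 1) pvZ) (h.getD (2 * pos + 2) pvZ)) = true
  · unfold pvChild at hne ⊢
    rw [if_pos hcond] at hne ⊢
    have hs1 : s = 2 * pos + 1 := by omega
    subst hs1
    simp only [Bool.and_eq_true, Bool.not_eq_true'] at hcond
    exact (pvTlt_false_iff _ _).1 hcond.2
  · unfold pvChild at hne ⊢
    rw [if_neg hcond] at hne ⊢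
    have hs2 : s = 2 * pos + 2 := by omega
    subst hs2
    have ht : pvTlt (h.getD (2 * pos + 1) pvZ) (h.getD (2 * pos + 2) pvZ) = true := by
      cases hx : pvTlt (h.getD (2 * pos + 1) pvZ) (h.getD (2 * pos + 2) pvZ)
      · refine absurd ?_ hcond
        rw [hx]
        simp [hs]
      · rfl
    exact pvLt_asymm ((pvTlt_iff _ _).1 ht)

theorem pvSiftup_spec :
    ∀ (n : Nat) (h : List (Int × Int × Int)) (pos : Nat) (x : Int × Int × Int),
      h.length - pos = n → pos < h.length → pvSuPre h pos →
      pvIsHeap (pvSiftup h pos x) ∧ (pvSiftup h pos x).Perm (h.set pos x) := by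
  intro n
  induction n using Nat.strong_induction_on with
  | _ n ih =>
    intro h pos x hn hpos hpre
    obtain ⟨pre1, pre2⟩ := hpre
    rw [pvSiftup]
    by_cases hc : 2 * pos + 1 < h.length
    · simp only [dif_pos hc]
      set c := pvChild h pos with hcdef
      have hcb := pvChild_bounds h pos
      have hclen : c < h.length := pvChild_lt h pos hc
      have hcpos : (c - 1) / 2 = pos := by omega
      have hlen' : (h.set pos (h.getD c pvZ)).length = h.length := by simp
      have hrec := ih (h.length - c) (by omega) (h.set pos (h.getD c pvZ)) c x
        (by omega) (by omega) ?_
      · refine ⟨hrec.1, hrec.2.trans ?_⟩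
        exact pvPerm_set_set h pos c x hpos hclen (by omega)
      · constructor
        · intro i h0i hilen hine hipar
          rw [hlen'] at hilen
          rw [pvGetD_set, pvGetD_set]
          by_cases hipos : i = pos
          · -- the edge from pos's parent into pos, now holding the promoted child
            have h2 : ¬ (pos = (i - 1) / 2 ∧ pos < h.length) := by
              intro hk
              omega
            rw [if_pos ⟨hipos.symm, hpos⟩, if_neg h2]
            have h3 := pre2 c hclen hcpos (by omega) (by omega)
            rw [hipos]
            exact h3
          · have h1 : ¬ (pos = i ∧ pos < h.length) := fun hk => hipos hk.1.symm
            rw [if_neg h1]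
            by_cases hcp : (i - 1) / 2 = pos
            · -- i is the sibling of the promoted child
              rw [if_pos ⟨hcp.symm, hpos⟩]
              exact pvChild_min h pos i hilen (by omega) (by omega) (by omega)
            · have h2 : ¬ (pos = (i - 1) / 2 ∧ pos < h.length) := fun hk => hcp hk.1.symm
              rw [if_neg h2]
              exact pre1 i h0i hilen hipos hcp
        · intro i hilen hipar hine hc0
          rw [hlen'] at hilen
          rw [pvGetD_set, pvGetD_set, hcpos]
          have h1 : ¬ (pos = i ∧ pos < h.length) := by
            intro hk; omega
          rw [if_neg h1, if_pos ⟨rfl, hpos⟩]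
          have h3 := pre1 i (by omega) hilen (by omega) (by omega)
          rwa [hipar] at h3
    · -- pos is a leaf: place x there and sift it up
      simp only [dif_neg hc]
      have hsd := pvSiftdown_spec pos (h.set pos x) x (by simpa using hpos) ?_
      · refine ⟨hsd.1, hsd.2.trans ?_⟩
        rw [List.set_set]
      · constructor
        · intro i h0i hilen hine hipar
          rw [List.length_set] at hilen
          rw [pvGetD_set, pvGetD_set]
          have h1 : ¬ (pos = i ∧ pos < h.length) := fun hk => hine hk.1.symm
          have h2 : ¬ (pos = (i - 1) / 2 ∧ pos < h.length) := fun hk => hipar hk.1.symm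
          rw [if_neg h1, if_neg h2]
          exact pre1 i h0i hilen hine hipar
        constructor
        · intro i hilen hipar hine
          rw [List.length_set] at hilen
          omega
        · intro i hilen hipar hine hp0
          rw [List.length_set] at hilen
          omega

theorem pvHeappush_spec (h : List (Int × Int × Int)) (x : Int × Int × Int)
    (hh : pvIsHeap h) :
    pvIsHeap (pvHeappush h x) ∧ (pvHeappush h x).Perm (h ++ [x]) := by
  unfold pvHeappush
  have hlen : h.length < (h ++ [x]).length := by simp
  have hsd := pvSiftdown_spec h.length (h ++ [x]) x hlen ?_
  · refine ⟨hsd.1, hsd.2.trans ?_⟩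
    have : (h ++ [x]).set h.length x = h ++ [x] := by
      rw [List.set_append_right _ _ (le_refl _)]
      simp
    rw [this]
  · constructor
    · intro i h0i hilen hine hipar
      rw [List.length_append, List.length_singleton] at hilen
      have hi : i < h.length := by omega
      have hp : (i - 1) / 2 < h.length := by omega
      rw [pvGetD_eq_getElem _ i (by simpa using hilen),
        pvGetD_eq_getElem _ ((i - 1) / 2) (by simp; omega),
        List.getElem_append_left hi, List.getElem_append_left hp]
      have := hh i h0i hi
      rwa [pvGetD_eq_getElem _ i hi, pvGetD_eq_getElem _ ((i - 1) / 2) hp] at this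
    constructor
    · intro i hilen hipar hine
      rw [List.length_append, List.length_singleton] at hilen
      omega
    · intro i hilen hipar hine hp0
      rw [List.length_append, List.length_singleton] at hilen
      omega

theorem pvHeappop_spec (a : Int × Int × Int) (t : List (Int × Int × Int))
    (hh : pvIsHeap (a :: t)) :
    (pvHeappop (a :: t)).1 = a ∧ pvIsHeap (pvHeappop (a :: t)).2 ∧
      (pvHeappop (a :: t)).2.Perm t := by
  cases t with
  | nil =>
    refine ⟨rfl, ?_, List.Perm.refl _⟩
    intro i h0i hilen
    simp [pvHeappop] at hilen
  | cons b t' =>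
    set t := b :: t' with htdef
    have htne : t ≠ [] := by simp [htdef]
    have hdl : (a :: t).dropLast = a :: t.dropLast := by
      rw [htdef]; rfl
    have hlast : (a :: t).getLast?.getD pvZ = t.getLast htne := by
      rw [List.getLast?_eq_some_getLast (show (a :: t) ≠ [] by simp), Option.getD_some,
        List.getLast_cons htne]
    set L := t.getLast htne with hLdef
    have hstep : pvHeappop (a :: t) =
        (a, pvSiftup (L :: t.dropLast) 0 L) := by
      unfold pvHeappop
      rw [hlast, hdl]
      simp
    rw [hstep]
    have hlen : 0 < (L :: t.dropLast).length := by simp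
    have hsu := pvSiftup_spec ((L :: t.dropLast).length - 0) (L :: t.dropLast) 0 L rfl hlen ?_
    · refine ⟨rfl, hsu.1, ?_⟩
      have hset : (L :: t.dropLast).set 0 L = L :: t.dropLast := rfl
      rw [hset] at hsu
      refine hsu.2.trans ?_
      have h1 : (L :: t.dropLast).Perm (t.dropLast ++ [L]) :=
        (List.perm_append_singleton _ _).symm
      rwa [List.dropLast_append_getLast htne] at h1
    · have hval : ∀ j, 0 < j → j < (L :: t.dropLast).length →
          (L :: t.dropLast).getD j pvZ = (a :: t).getD j pvZ := by
        intro j hj hjl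
        have hdll := t.length_dropLast
        have h1 : j - 1 < t.dropLast.length := by simp at hjl; omega
        have h2 : j < (a :: t).length := by simp at hjl ⊢; omega
        rw [pvGetD_eq_getElem _ j hjl, pvGetD_eq_getElem _ j h2]
        obtain ⟨k, rfl⟩ : ∃ k, j = k + 1 := ⟨j - 1, by omega⟩
        simp [List.getElem_dropLast]
      constructor
      · intro i h0i hilen hine hipar
        rw [hval i h0i hilen, hval ((i - 1) / 2) (by omega) (by simp at hilen ⊢; omega)]
        exact hh i h0i (by simp at hilen ⊢; have := t.length_dropLast; omega)
      · intro i hilen hipar hine hp0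
        omega
-- Python's min over a nonempty list: the result is a member and a lower bound.
theorem pvFoldlMin_spec (l : List (Int × Int × Int)) :
    ∀ m : Int × Int × Int,
      (l.foldl (fun m y => if pvTlt y m then y else m) m = m ∨
        l.foldl (fun m y => if pvTlt y m then y else m) m ∈ l) ∧
      ¬ pvLt m (l.foldl (fun m y => if pvTlt y m then y else m) m) ∧
      ∀ z ∈ l, ¬ pvLt z (l.foldl (fun m y => if pvTlt y m then y else m) m) := by
  induction l with
  | nil => intro m; exact ⟨Or.inl rfl, pvLt_irrefl m, by simp⟩
  | cons y ys ih =>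
    intro m
    simp only [List.foldl_cons]
    by_cases hy : pvTlt y m = true
    · have hlt := (pvTlt_iff _ _).1 hy
      rw [if_pos hy]
      obtain ⟨hmem, hbm, hall⟩ := ih y
      refine ⟨?_, ?_, ?_⟩
      · rcases hmem with hm | hm
        · exact Or.inr (by simp [hm])
        · exact Or.inr (List.mem_cons_of_mem _ hm)
      · exact fun hmr => hbm (pvLt_trans hlt hmr)
      · intro z hz
        rcases List.mem_cons.1 hz with rfl | hz'
        · exact hbm
        · exact hall z hz'
    · have hge := (pvTlt_false_iff _ _).1 (by simpa using hy)
      rw [if_neg (by simpa using hy)]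
      obtain ⟨hmem, hbm, hall⟩ := ih m
      refine ⟨?_, hbm, ?_⟩
      · rcases hmem with hm | hm
        · exact Or.inl hm
        · exact Or.inr (List.mem_cons_of_mem _ hm)
      · intro z hz
        rcases List.mem_cons.1 hz with rfl | hz'
        · exact pvLe_trans hbm hge
        · exact hall z hz'

theorem pvMinFirst_spec (fr : List (Int × Int × Int)) (hne : fr ≠ []) :
    pvMinFirst fr ∈ fr ∧ ∀ z ∈ fr, ¬ pvLt z (pvMinFirst fr) := by
  cases fr with
  | nil => exact absurd rfl hne
  | cons a t =>
    obtain ⟨hmem, hbm, hall⟩ := pvFoldlMin_spec t a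
    refine ⟨?_, ?_⟩
    · unfold pvMinFirst
      rcases hmem with hm | hm
      · simp [hm]
      · exact List.mem_cons_of_mem _ hm
    · intro z hz
      unfold pvMinFirst
      rcases List.mem_cons.1 hz with rfl | hz'
      · exact hbm
      · exact hall z hz'

theorem pvMinFirst_eq (fr : List (Int × Int × Int)) (a : Int × Int × Int)
    (ha : a ∈ fr) (hmin : ∀ y ∈ fr, ¬ pvLt y a) : pvMinFirst fr = a := by
  have hne : fr ≠ [] := by intro h; subst h; exact absurd ha (by simp)
  obtain ⟨hmem, hall⟩ := pvMinFirst_spec fr hne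
  exact pvLe_antisymm (hmin _ hmem) (hall a ha)

-- the neighbour-push folds of the two ports preserve the heap/frontier relation
theorem pvPushfold_rel (A : List (List Int)) (rows cols x y : Int) :
    ∀ (ds : List (Int × Int)) (hp fr : List (Int × Int × Int))
      (vis : PySem.Set (Int × Int)),
      pvIsHeap hp → hp.Perm fr →
      pvIsHeap (ds.foldl (pvPushA A rows cols x y) (hp, vis)).1 ∧
      ((ds.foldl (pvPushA A rows cols x y) (hp, vis)).1).Perm
        ((ds.foldl (pvPushB A rows cols x y) (fr, vis)).1) ∧
      (ds.foldl (pvPushA A rows cols x y) (hp, vis)).2 =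
        (ds.foldl (pvPushB A rows cols x y) (fr, vis)).2 := by
  intro ds
  induction ds with
  | nil => intro hp fr vis hh hperm; exact ⟨hh, hperm, rfl⟩
  | cons d ds ih =>
    intro hp fr vis hh hperm
    simp only [List.foldl_cons]
    unfold pvPushA pvPushB
    by_cases hc : 0 ≤ x + d.1 ∧ x + d.1 < rows ∧ 0 ≤ y + d.2 ∧ y + d.2 < cols ∧
        ¬(PySem.Set.contains vis (x + d.1, y + d.2) = true)
    · rw [if_pos hc, if_pos hc]
      have hp' := pvHeappush_spec hp
        (-(PySem.List.pyGetD (PySem.List.pyGetD A (x + d.1) []) (y + d.2) 0), x + d.1, y + d.2) hh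
      exact ih _ _ _ hp'.1 (hp'.2.trans (hperm.append_right _))
    · rw [if_neg hc, if_neg hc]
      exact ih _ _ _ hh hperm

-- lockstep simulation of the two while loops once the running minimum is an int
theorem pvLoop_rel (A : List (List Int)) (rows cols : Int) :
    ∀ (fuel : Nat) (hp fr : List (Int × Int × Int)) (vis : PySem.Set (Int × Int)) (r : Int),
      pvIsHeap hp → hp.Perm fr →
      pvLoopA A rows cols fuel hp vis (some r) = pvLoopB A rows cols fuel fr vis r := by
  intro fuel
  induction fuel with
  | zero => intro hp fr vis r hh hperm; rfl
  | succ fuel ih =>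
    intro hp fr vis r hh hperm
    cases hp with
    | nil =>
      have hfr : fr = [] := hperm.symm.eq_nil
      subst hfr
      rfl
    | cons a t =>
      cases fr with
      | nil => exact absurd hperm.eq_nil (by simp)
      | cons b fr' =>
        obtain ⟨hfst, hheap2, hperm2⟩ := pvHeappop_spec a t hh
        have hbest : pvMinFirst (b :: fr') = a :=
          pvMinFirst_eq _ a (hperm.mem_iff.mp (List.mem_cons_self ..))
            (fun y hy => pvRoot_min_mem a t hh y (hperm.mem_iff.mpr hy))
        have hmem : a ∈ b :: fr' := hperm.mem_iff.mp (List.mem_cons_self ..)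
        have hrem : (PySem.List.remove? (b :: fr') a).getD [] = (b :: fr').erase a := by
          rw [PySem.List.remove?_eq_some_erase _ _ hmem]
          rfl
        have hperm3 : (pvHeappop (a :: t)).2.Perm ((b :: fr').erase a) := by
          refine hperm2.trans ?_
          have := hperm.erase a
          rwa [List.erase_cons_head] at this
        simp only [pvLoopA, pvLoopB, hbest, hrem, hfst, pvMinInf]
        by_cases hend : a.2.1 = rows - 1 ∧ a.2.2 = cols - 1
        · simp [hend]
        · simp only [if_neg hend]
          obtain ⟨hh', hp', hv'⟩ := pvPushfold_rel A rows cols a.2.1 a.2.2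
            [((1 : Int), (0 : Int)), (0, 1), (0, -1), (-1, 0)]
            (pvHeappop (a :: t)).2 ((b :: fr').erase a) vis hheap2 hperm3
          rw [hv']
          exact ih _ _ _ _ hh' hp'

theorem pvFirst_step (A : List (List Int)) (rows cols : Int) (fuel : Nat)
    (vis : PySem.Set (Int × Int)) (a00 : Int) :
    pvLoopA A rows cols (fuel + 1) [(-a00, 0, 0)] vis none =
      pvLoopB A rows cols (fuel + 1) [(-a00, 0, 0)] vis a00 := by
  have hpop : pvHeappop [((-a00 : Int), (0 : Int), (0 : Int))] = ((-a00, 0, 0), []) := rfl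
  have hmin : pvMinFirst [((-a00 : Int), (0 : Int), (0 : Int))] = (-a00, 0, 0) := rfl
  have hrem : (PySem.List.remove? [((-a00 : Int), (0 : Int), (0 : Int))]
      ((-a00 : Int), (0 : Int), (0 : Int))).getD [] = [] := by
    rw [PySem.List.remove?_cons_self]
    rfl
  simp only [pvLoopA, pvLoopB, hpop, hmin, hrem, pvMinInf, neg_neg, min_self]
  by_cases hend : (0 : Int) = rows - 1 ∧ (0 : Int) = cols - 1
  · rw [if_pos hend, if_pos hend]
  · simp only [if_neg hend]
    have hnil : pvIsHeap ([] : List (Int × Int × Int)) := by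
      intro i h0i hilen
      simp at hilen
    obtain ⟨hh', hp', hv'⟩ := pvPushfold_rel A rows cols 0 0
      [((1 : Int), (0 : Int)), (0, 1), (0, -1), (-1, 0)] [] [] vis hnil (List.Perm.refl _)
    rw [hv']
    exact pvLoop_rel A rows cols fuel _ _ _ _ hh' hp'

theorem maximumMinimumPath_equal_all (A : List (List Int)) :
    maximumMinimumPath A = maximumMinimumPath_alt A := by
  unfold maximumMinimumPath maximumMinimumPath_alt
  have hS : (PySem.Set.add PySem.Set.empty ((0 : Int), (0 : Int))) =
      PySem.Set.ofList [((0 : Int), (0 : Int))] := rfl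
  rw [hS]
  exact pvFirst_step A _ _ _ _ _

-- ===== VERDICT (by name: the statement is the Claim_ definition above) =====
theorem maximumMinimumPath_spec : Claim_equal_maximumMinimumPath := by
  intro A _ _
  unfold Spec_maximumMinimumPath
  exact maximumMinimumPath_equal_all A
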